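-- pv_equiv track=rewrite | github.com/HasanBradfordUni/myPublicFiles | Portfolio/Python Apps/Football chess/Football_chess V12.py | CB_moves
-- ===== SOURCE A (Python) =====
-- def CB_moves(moveFromX, moveFromY, moveToX, moveToY, size, player1Turn, player2Turn):
--     possibleMoves = []
--
--     moveDif = ((moveToX - moveFromX),(moveToY - moveFromY))
--
--     if player2Turn:
--         possibleMoves.append((-1,0))
--     elif player1Turn:
--         possibleMoves.append((1,0))
--
--     for x in range(size):
--         if player2Turn:
--             possibleMoves.append((x,0))
--         elif player1Turn:
--             possibleMoves.append((-x,0))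
--
--     for x in range(size):
--         for y in range(size):
--             if x == y:
--                 if player2Turn:
--                     possibleMoves.append((x,-y))
--                     possibleMoves.append((x,y))
--                 elif player1Turn:
--                     possibleMoves.append((-x,-y))
--                     possibleMoves.append((-x,y))
--
--     if moveDif in possibleMoves:
--         return True
--     else:
--         return False
-- ===== SOURCE B (Python) =====
-- def CB_moves(moveFromX, moveFromY, moveToX, moveToY, size, player1Turn, player2Turn):
--     dx = moveToX - moveFromX
--     dy = moveToY - moveFromY
--     if player2Turn:
--         return (dy == 0 and (dx == -1 or 0 <= dx < size)) or \
--                (0 <= dx < size and (dy == dx or dy == -dx))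
--     if player1Turn:
--         return (dy == 0 and (dx == 1 or -size < dx <= 0)) or \
--                (-size < dx <= 0 and (dy == dx or dy == -dx))
--     return False
-- ===== Notes on version B (the rewrite author's own statement) =====
-- stated objective: faster
-- what changed: B replaces A's construction of the entire possible-move list (an O(size) pass plus an O(size^2) nested loop) and the final linear membership scan by a direct O(1) arithmetic test on the displacement (dx,dy) and whose turn it is.
import Mathlib
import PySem

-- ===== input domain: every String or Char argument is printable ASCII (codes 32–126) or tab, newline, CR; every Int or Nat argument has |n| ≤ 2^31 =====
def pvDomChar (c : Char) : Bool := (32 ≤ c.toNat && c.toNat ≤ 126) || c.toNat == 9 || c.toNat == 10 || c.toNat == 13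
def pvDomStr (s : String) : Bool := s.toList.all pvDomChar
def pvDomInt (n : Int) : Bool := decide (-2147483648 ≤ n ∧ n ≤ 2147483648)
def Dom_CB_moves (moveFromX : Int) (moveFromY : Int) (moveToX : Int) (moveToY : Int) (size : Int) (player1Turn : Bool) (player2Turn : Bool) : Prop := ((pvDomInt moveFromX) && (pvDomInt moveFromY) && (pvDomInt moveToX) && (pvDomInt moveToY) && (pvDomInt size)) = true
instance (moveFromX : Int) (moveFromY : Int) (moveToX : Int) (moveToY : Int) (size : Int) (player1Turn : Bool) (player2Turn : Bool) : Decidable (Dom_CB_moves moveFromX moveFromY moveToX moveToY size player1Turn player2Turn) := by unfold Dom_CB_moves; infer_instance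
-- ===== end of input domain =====

-- B replaces A's construction-and-scan of the full move list by a direct O(1) arithmetic test on the displacement.


-- ===== PORT A =====
def CB_moves (moveFromX : Int) (moveFromY : Int) (moveToX : Int) (moveToY : Int) (size : Int) (player1Turn : Bool) (player2Turn : Bool) : Bool :=
  let moveDif : Int × Int := (moveToX - moveFromX, moveToY - moveFromY)
  let pm0 : List (Int × Int) :=
    if player2Turn then [((-1 : Int), (0 : Int))]
    else if player1Turn then [((1 : Int), (0 : Int))]
    else []
  let pm1 : List (Int × Int) := (PySem.List.pyRange 0 size 1).foldl
    (fun acc x =>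
      if player2Turn then acc ++ [(x, (0 : Int))]
      else if player1Turn then acc ++ [(-x, (0 : Int))]
      else acc) pm0
  let pm2 : List (Int × Int) := (PySem.List.pyRange 0 size 1).foldl
    (fun acc x => (PySem.List.pyRange 0 size 1).foldl
      (fun acc2 y =>
        if x == y then
          (if player2Turn then acc2 ++ [(x, -y), (x, y)]
           else if player1Turn then acc2 ++ [(-x, -y), (-x, y)]
           else acc2)
        else acc2) acc) pm1
  decide (moveDif ∈ pm2)

-- ===== PORT B =====
def CB_moves_alt (moveFromX : Int) (moveFromY : Int) (moveToX : Int) (moveToY : Int) (size : Int) (player1Turn : Bool) (player2Turn : Bool) : Bool :=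
  let dx := moveToX - moveFromX
  let dy := moveToY - moveFromY
  if player2Turn then
    (dy == 0 && (dx == -1 || (decide (0 ≤ dx) && decide (dx < size)))) ||
    ((decide (0 ≤ dx) && decide (dx < size)) && (dy == dx || dy == -dx))
  else if player1Turn then
    (dy == 0 && (dx == 1 || (decide (-size < dx) && decide (dx ≤ 0)))) ||
    ((decide (-size < dx) && decide (dx ≤ 0)) && (dy == dx || dy == -dx))
  else false

-- ===== PRECONDITION & SPEC =====
def Spec_CB_moves (moveFromX : Int) (moveFromY : Int) (moveToX : Int) (moveToY : Int) (size : Int) (player1Turn : Bool) (player2Turn : Bool) (out : Bool) : Prop := out = CB_moves_alt moveFromX moveFromY moveToX moveToY size player1Turn player2Turn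
instance (moveFromX : Int) (moveFromY : Int) (moveToX : Int) (moveToY : Int) (size : Int) (player1Turn : Bool) (player2Turn : Bool) (out : Bool) : Decidable (Spec_CB_moves moveFromX moveFromY moveToX moveToY size player1Turn player2Turn out) := by unfold Spec_CB_moves; infer_instance

-- ===== CLAIM (what is proved, stated in full; the proofs are below) =====
def Claim_equal_CB_moves : Prop := ∀ (moveFromX : Int) (moveFromY : Int) (moveToX : Int) (moveToY : Int) (size : Int) (player1Turn : Bool) (player2Turn : Bool), Dom_CB_moves moveFromX moveFromY moveToX moveToY size player1Turn player2Turn → Spec_CB_moves moveFromX moveFromY moveToX moveToY size player1Turn player2Turn (CB_moves moveFromX moveFromY moveToX moveToY size player1Turn player2Turn)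

-- ===== LEMMAS AND PROOFS =====

-- inner-loop step of A's nested fold, rewritten to the 'acc ++ g y' shape
theorem pvStep2 (x : Int) (L : Int → List (Int × Int)) :
    (fun (acc2 : List (Int × Int)) (y : Int) => if x == y then acc2 ++ L y else acc2) =
    (fun acc2 y => acc2 ++ (if x == y then L y else [])) := by
  funext acc2 y; split <;> simp

-- ===== VERDICT (by name: the statement is the Claim_ definition above) =====
theorem CB_moves_spec : Claim_equal_CB_moves := by
  intro fx fy tx ty size p1 p2 _
  unfold Spec_CB_moves
  cases p2
  · cases p1
    · simp [CB_moves, CB_moves_alt]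
    · -- player1's turn
      simp only [CB_moves, CB_moves_alt, Bool.false_eq_true, if_true, if_false]
      rw [PySem.List.foldl_append_singleton_eq_map]
      simp only [pvStep2, PySem.List.foldl_append_eq_flatMap]
      rw [Bool.eq_iff_iff]
      simp only [decide_eq_true_eq, List.mem_append, List.mem_flatMap, List.mem_map,
        List.mem_cons, List.not_mem_nil, PySem.List.mem_pyRange_one, beq_iff_eq,
        Bool.or_eq_true, Bool.and_eq_true, Prod.mk.injEq]
      constructor
      · rintro (((⟨h1, h2⟩ | hF) | ⟨x, ⟨hx1, hx2⟩, h1, h2⟩) | ⟨x, ⟨hx1, hx2⟩, y, ⟨hy1, hy2⟩, hmem⟩)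
        · omega
        · exact hF.elim
        · omega
        · by_cases hxy : x = y
          · rw [if_pos hxy] at hmem
            simp only [List.mem_cons, List.not_mem_nil, or_false, Prod.mk.injEq] at hmem
            omega
          · rw [if_neg hxy] at hmem; simp at hmem
      · rintro (⟨hdy, hdx⟩ | ⟨⟨ha, hb⟩, hd⟩)
        · rcases hdx with h | ⟨ha, hb⟩
          · left; left; left; omega
          · left; right; exact ⟨fx - tx, ⟨by omega, by omega⟩, by omega, by omega⟩
        · right
          refine ⟨fx - tx, ⟨by omega, by omega⟩, fx - tx, ⟨by omega, by omega⟩, ?_⟩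
          rw [if_pos rfl]
          simp only [List.mem_cons, List.not_mem_nil, or_false, Prod.mk.injEq]
          omega
  · -- player2's turn (both values of p1)
    cases p1 <;>
    · simp only [CB_moves, CB_moves_alt, Bool.false_eq_true, if_true, if_false]
      rw [PySem.List.foldl_append_singleton_eq_map]
      simp only [pvStep2, PySem.List.foldl_append_eq_flatMap]
      rw [Bool.eq_iff_iff]
      simp only [decide_eq_true_eq, List.mem_append, List.mem_flatMap, List.mem_map,
        List.mem_cons, List.not_mem_nil, PySem.List.mem_pyRange_one, beq_iff_eq,
        Bool.or_eq_true, Bool.and_eq_true, Prod.mk.injEq]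
      constructor
      · rintro (((⟨h1, h2⟩ | hF) | ⟨x, ⟨hx1, hx2⟩, h1, h2⟩) | ⟨x, ⟨hx1, hx2⟩, y, ⟨hy1, hy2⟩, hmem⟩)
        · omega
        · exact hF.elim
        · omega
        · by_cases hxy : x = y
          · rw [if_pos hxy] at hmem
            simp only [List.mem_cons, List.not_mem_nil, or_false, Prod.mk.injEq] at hmem
            omega
          · rw [if_neg hxy] at hmem; simp at hmem
      · rintro (⟨hdy, hdx⟩ | ⟨⟨ha, hb⟩, hd⟩)
        · rcases hdx with h | ⟨ha, hb⟩
          · left; left; left; omega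
          · left; right; exact ⟨tx - fx, ⟨by omega, by omega⟩, by omega, by omega⟩
        · right
          refine ⟨tx - fx, ⟨by omega, by omega⟩, tx - fx, ⟨by omega, by omega⟩, ?_⟩
          rw [if_pos rfl]
          simp only [List.mem_cons, List.not_mem_nil, or_false, Prod.mk.injEq, true_and]
          omega
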